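-- pv_equiv track=rewrite | github.com/isyourhand/20260306-logistic-excel-to-db | logistics_ingest/app/header_parser.py | find_last_col
-- ===== SOURCE A (Python) =====
-- def normalize_text(s: str) -> str:
--     return s.replace("\n", " ").replace("\r", " ").strip()
--
-- def find_last_col(row: list[str], hints: tuple[str, ...]) -> int | None:
--     for i in range(len(row) - 1, -1, -1):
--         t = normalize_text(row[i])
--         if not t:
--             continue
--         if any(h in t for h in hints):
--             return i
--     return None
-- ===== SOURCE B (Python) =====
-- def find_last_col(row, hints):
--     result = None
--     for i, cell in enumerate(row):
--         t = cell.replace("\n", " ").replace("\r", " ").strip()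
--         if t and any(h in t for h in hints):
--             result = i
--     return result
-- ===== Notes on version B (the rewrite author's own statement) =====
-- stated objective: alternative
-- what changed: Replaces A's reverse index scan with early return by a complete forward pass over enumerate(row) that carries a last-match accumulator, returning it after the loop.
import Mathlib
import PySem

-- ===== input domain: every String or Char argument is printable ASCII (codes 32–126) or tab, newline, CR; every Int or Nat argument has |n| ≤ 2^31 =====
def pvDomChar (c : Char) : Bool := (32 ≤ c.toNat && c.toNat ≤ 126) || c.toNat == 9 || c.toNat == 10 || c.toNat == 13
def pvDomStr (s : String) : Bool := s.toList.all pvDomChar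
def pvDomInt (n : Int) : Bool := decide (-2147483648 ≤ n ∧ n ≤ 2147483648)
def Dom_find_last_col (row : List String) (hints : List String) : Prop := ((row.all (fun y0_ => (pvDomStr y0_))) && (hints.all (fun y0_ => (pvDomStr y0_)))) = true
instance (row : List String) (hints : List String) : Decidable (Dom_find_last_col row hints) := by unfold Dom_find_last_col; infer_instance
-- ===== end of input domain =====

-- B replaces A's reverse index scan with early return by one complete forward pass
-- carrying a last-match accumulator; same cost, different decomposition.

-- ===== PORT A =====
-- normalize_text: s.replace("\n", " ").replace("\r", " ").strip()
def normalize_text (s : String) : String :=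
  PySem.Str.strip (PySem.Str.replace (PySem.Str.replace s "\n" " ") "\r" " ")

-- the for-loop over range(len(row)-1, -1, -1) with early return; row[i] is always in
-- range here, so the getD default "" is never used
def find_last_col_loop (row : List String) (hints : List String) : List Int → Option Int
  | [] => none
  | i :: rest =>
    let t := normalize_text (PySem.List.pyGetD row i "")
    if t = "" then find_last_col_loop row hints rest
    else if hints.any (fun h => PySem.Str.isIn h t) then some i
    else find_last_col_loop row hints rest

def find_last_col (row : List String) (hints : List String) : Option Int :=
  find_last_col_loop row hints (PySem.List.pyRange ((row.length : Int) - 1) (-1) (-1))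

-- ===== PORT B =====
-- for i, cell in enumerate(row): if cleaned cell matches, result = i; return result
def find_last_col_alt (row : List String) (hints : List String) : Option Int :=
  (PySem.List.enumerate row).foldl
    (fun result p =>
      let t := PySem.Str.strip (PySem.Str.replace (PySem.Str.replace p.2 "\n" " ") "\r" " ")
      if t ≠ "" && hints.any (fun h => PySem.Str.isIn h t) then some p.1 else result)
    none

-- ===== PRECONDITION & SPEC =====
def Spec_find_last_col (row : List String) (hints : List String) (out : Option Int) : Prop := out = find_last_col_alt row hints
instance (row : List String) (hints : List String) (out : Option Int) : Decidable (Spec_find_last_col row hints out) := by unfold Spec_find_last_col; infer_instance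

-- ===== CLAIM (what is proved, stated in full; the proofs are below) =====
def Claim_equal_find_last_col : Prop := ∀ (row : List String) (hints : List String), Dom_find_last_col row hints → Spec_find_last_col row hints (find_last_col row hints)

-- ===== LEMMAS AND PROOFS =====

-- the shared match test on an index, via the (always in-range) lookup
def pvMatchAt (row : List String) (hints : List String) (i : Int) : Bool :=
  let t := normalize_text (PySem.List.pyGetD row i "")
  t ≠ "" && hints.any (fun h => PySem.Str.isIn h t)

-- A's loop is find? of pvMatchAt over its index list
theorem loop_eq_find (row hints : List String) (l : List Int) :
    find_last_col_loop row hints l = l.find? (pvMatchAt row hints) := by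
  induction l with
  | nil => rfl
  | cons i rest ih =>
    simp only [find_last_col_loop, List.find?, pvMatchAt]
    by_cases ht : normalize_text (PySem.List.pyGetD row i "") = ""
    · simp [ht, ih]
    · cases hany : hints.any (fun h => PySem.Chars.isIn h.toList (normalize_text (PySem.List.pyGetD row i "")).toList) <;>
        simp [ht, hany, ih]

-- B's last-match foldl is find-first on the reversed list
theorem foldl_last_match {α : Type} (P : Int × α → Bool) (l : List (Int × α)) (acc : Option Int) :
    l.foldl (fun r p => if P p then some p.1 else r) acc
      = match l.reverse.find? P with
        | some q => some q.1
        | none => acc := by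
  induction l generalizing acc with
  | nil => rfl
  | cons x xs ih =>
    simp only [List.foldl, List.reverse_cons, List.find?_append, ih]
    cases h : xs.reverse.find? P with
    | some q => simp
    | none =>
      by_cases hx : P x = true <;> simp [List.find?, hx]

theorem find_last_col_spec_aux (row hints : List String) :
    find_last_col row hints = find_last_col_alt row hints := by
  have henum : PySem.List.enumerate row
      = (PySem.List.pyRange 0 (row.length : Int) 1).map
          (fun j => (j, PySem.List.pyGetD row j "")) := by
    simpa using PySem.List.enumerate_eq_map_pyRange row ""
  have hrange : PySem.List.pyRange ((row.length : Int) - 1) (-1) (-1)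
      = (PySem.List.pyRange 0 (row.length : Int) 1).reverse := by
    have := PySem.List.pyRange_neg_one_eq_reverse ((row.length : Int) - 1) (-1)
    simpa using this
  unfold find_last_col find_last_col_alt
  rw [loop_eq_find, hrange,
    foldl_last_match (fun p : Int × String =>
      let t := PySem.Str.strip (PySem.Str.replace (PySem.Str.replace p.2 "\n" " ") "\r" " ")
      t ≠ "" && hints.any (fun h => PySem.Str.isIn h t)),
    henum, ← List.map_reverse, List.find?_map]
  have hc : ((fun p : Int × String =>
      let t := PySem.Str.strip (PySem.Str.replace (PySem.Str.replace p.2 "\n" " ") "\r" " ")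
      t ≠ "" && hints.any (fun h => PySem.Str.isIn h t))
      ∘ (fun j => (j, PySem.List.pyGetD row j ""))) = pvMatchAt row hints := by
    funext j
    simp only [Function.comp_apply, pvMatchAt, normalize_text]
    rfl
  rw [hc]
  cases h : (PySem.List.pyRange 0 (row.length : Int) 1).reverse.find? (pvMatchAt row hints) <;> simp

-- ===== VERDICT (by name: the statement is the Claim_ definition above) =====
theorem find_last_col_spec : Claim_equal_find_last_col := by
  intro row hints _
  unfold Spec_find_last_col
  exact find_last_col_spec_aux row hints
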